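-- pv_equiv track=rewrite | github.com/konstantinosKokos/ape | eval/tasks/nmt/utils.py | merge_bpe
-- ===== SOURCE A (Python) =====
-- def merge_bpe(xs: list[str]) -> list[str]:
--     match xs:
--         case [x]:
--             return [x]
--         case (x1, x2, *rest):
--             if x1.endswith('@@'):
--                 return merge_bpe([x1.rstrip('@@')+x2, *rest])
--             return [x1, *merge_bpe([x2, *rest])]
-- ===== SOURCE B (Python) =====
-- def merge_bpe(xs: list[str]) -> list[str]:
--     out = []
--     buf = ''
--     n = len(xs)
--     for i, x in enumerate(xs):
--         cur = buf + x
--         if x.endswith('@@') and i < n - 1: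
--             buf = cur.rstrip('@')
--         else:
--             out.append(cur)
--             buf = ''
--     return out
-- ===== Notes on version B (the rewrite author's own statement) =====
-- stated objective: faster
-- what changed: A recursively rebuilds the whole remaining list on every step (each '@@' merge or emit constructs a fresh list and recurses); B makes one left-to-right pass with an accumulator buffer, appending a finished word whenever the current token does not end in '@@' or is last.
-- outside the precondition, e.g. on merge_bpe([]): A returns None, B returns []
import Mathlib
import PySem

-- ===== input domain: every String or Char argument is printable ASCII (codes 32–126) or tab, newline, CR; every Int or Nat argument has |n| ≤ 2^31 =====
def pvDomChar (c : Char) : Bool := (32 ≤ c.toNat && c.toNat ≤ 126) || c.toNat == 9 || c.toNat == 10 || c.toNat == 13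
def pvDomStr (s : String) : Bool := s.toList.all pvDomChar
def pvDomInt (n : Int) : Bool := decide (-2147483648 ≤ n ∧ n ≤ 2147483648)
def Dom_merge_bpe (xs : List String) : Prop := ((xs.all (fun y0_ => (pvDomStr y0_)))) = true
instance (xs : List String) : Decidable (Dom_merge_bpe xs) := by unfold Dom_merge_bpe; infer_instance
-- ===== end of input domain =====

-- B replaces A's recursive list rebuilding (a fresh list per merge step) by one
-- left-to-right pass with an accumulator buffer (objective: faster).

-- Hand ports of two Python string primitives (exact on all strings):
-- Python s1 + s2 on str (exact: code-point concatenation)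
def catStr (a b : String) : String := String.ofList (a.toList ++ b.toList)
-- Python s.rstrip('@@') / s.rstrip('@') — both strip the char set {'@'} from the right (exact)
def rstripAt (s : String) : String := String.ofList ((s.toList.reverse.dropWhile (· == '@')).reverse)

-- ===== PORT A =====
def merge_bpe (xs : List String) : List String :=
  match xs with
  | [x] => [x]
  | x1 :: x2 :: rest =>
    if PySem.Str.endswith x1 "@@" then
      merge_bpe (catStr (rstripAt x1) x2 :: rest)
    else
      x1 :: merge_bpe (x2 :: rest)
  | [] => []   -- Python's match has no arm here and A returns None; excluded by Pre_
termination_by xs.length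
decreasing_by all_goals simp

-- ===== PORT B =====
def merge_bpe_alt (xs : List String) : List String :=
  let n : Int := xs.length
  ((PySem.List.enumerate xs).foldl
    (fun (st : List String × String) (p : Int × String) =>
      let cur := catStr st.2 p.2
      if PySem.Str.endswith p.2 "@@" && decide (p.1 < n - 1) then
        (st.1, rstripAt cur)
      else
        (st.1 ++ [cur], ""))
    ([], "")).1

-- ===== PRECONDITION & SPEC =====
-- Pre_ excludes only the empty list, on which A's match has no matching arm and Python
-- returns None, not a value of the declared list type.
def Pre_merge_bpe (xs : List String) : Prop := xs ≠ []
instance (xs : List String) : Decidable (Pre_merge_bpe xs) := by unfold Pre_merge_bpe; infer_instance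
def pvWitness_merge_bpe : List String := ["ab@@", "cd"]

def Spec_merge_bpe (xs : List String) (out : List String) : Prop := out = merge_bpe_alt xs
instance (xs : List String) (out : List String) : Decidable (Spec_merge_bpe xs out) := by unfold Spec_merge_bpe; infer_instance

-- ===== CLAIM (what is proved, stated in full; the proofs are below) =====
def Claim_equal_merge_bpe : Prop := ∀ (xs : List String), Dom_merge_bpe xs → Pre_merge_bpe xs → Spec_merge_bpe xs (merge_bpe xs)

-- ===== LEMMAS AND PROOFS =====

-- B's loop, written structurally: the shape both ports reduce to.
def loopR (buf : String) : List String → List String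
  | [] => []
  | x :: rest =>
    if PySem.Str.endswith x "@@" && !rest.isEmpty then
      loopR (rstripAt (catStr buf x)) rest
    else
      catStr buf x :: loopR "" rest

-- loop invariant: the buffer has no trailing '@'
def okBuf (a : String) : Prop := a.toList.reverse.head? ≠ some '@'

theorem okBuf_empty : okBuf "" := by simp [okBuf]

theorem head?_dropWhile_false (p : Char → Bool) (l : List Char) (c : Char)
    (h : (l.dropWhile p).head? = some c) : p c = false := by
  have h1 : l.dropWhile p ≠ [] := by intro hn; simp [hn] at h
  have h2 := List.head_dropWhile_not (l := l) (p := p) h1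
  rw [List.head?_eq_some_head h1, Option.some_inj] at h
  rw [← h]; simpa using h2

theorem okBuf_rstripAt (s : String) : okBuf (rstripAt s) := by
  unfold okBuf rstripAt
  simp only [String.toList_ofList, List.reverse_reverse]
  intro h
  have := head?_dropWhile_false _ _ _ h
  simp at this

theorem toList_eq_of_eq {a b : String} (h : a.toList = b.toList) : a = b := by
  have := congrArg String.ofList h
  simpa using this

theorem catStr_empty_left (b : String) : catStr "" b = b := by
  apply toList_eq_of_eq; simp [catStr]

theorem dropWhile_eq_self_of_head (p : Char → Bool) (l : List Char)
    (h : ∀ c, l.head? = some c → p c = false) : l.dropWhile p = l := by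
  cases l with
  | nil => rfl
  | cons c t => rw [List.dropWhile_cons, h c rfl]; simp

theorem rstripAt_catStr (a b : String) (h : okBuf a) :
    rstripAt (catStr a b) = catStr a (rstripAt b) := by
  apply toList_eq_of_eq
  unfold rstripAt catStr okBuf at *
  simp only [String.toList_ofList, List.reverse_append, List.dropWhile_append]
  split
  · next he =>
    rw [dropWhile_eq_self_of_head _ _ ?_]
    · simp [List.isEmpty_iff.mp he]
    · intro c hc
      have : ¬ (c = '@') := by intro hcc; exact h (hcc ▸ hc)
      simpa using this
  · simp

theorem prefix_atat (ra : List Char) (h : ra.head? ≠ some '@') (rb : List Char) :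
    (['@','@'] <+: rb ++ ra) ↔ (['@','@'] <+: rb) := by
  match rb with
  | c1 :: c2 :: t => simp [List.cons_prefix_cons]
  | [c1] =>
    simp [List.cons_prefix_cons, List.prefix_nil]
    intro _ hpre
    rcases ra with _ | ⟨d, t⟩
    · simp at hpre
    · rw [List.cons_prefix_cons] at hpre
      exact h (by simp [hpre.1.symm])
  | [] =>
    simp [List.prefix_nil]
    intro hpre
    rcases ra with _ | ⟨d, t⟩
    · simp at hpre
    · rw [List.cons_prefix_cons] at hpre
      exact h (by simp [hpre.1.symm])

theorem endswith_catStr (a b : String) (h : okBuf a) :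
    PySem.Str.endswith (catStr a b) "@@" = PySem.Str.endswith b "@@" := by
  unfold catStr okBuf at *
  have key : (['@','@'] <:+ (a.toList ++ b.toList)) ↔ (['@','@'] <:+ b.toList) := by
    rw [← List.reverse_prefix, ← List.reverse_prefix]
    simp only [List.reverse_append]
    exact prefix_atat a.toList.reverse h b.toList.reverse
  rcases h1 : PySem.Str.endswith (String.ofList (a.toList ++ b.toList)) "@@" with _|_ <;>
  rcases h2 : PySem.Str.endswith b "@@" with _|_
  · rfl
  · exfalso
    rw [PySem.Str.endswith_eq, PySem.Chars.endswith_iff] at h2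
    have : PySem.Chars.endswith (String.ofList (a.toList ++ b.toList)).toList "@@".toList = true := by
      rw [PySem.Chars.endswith_iff]
      simpa using key.mpr (by simpa using h2)
    rw [PySem.Str.endswith_eq] at h1; rw [h1] at this; exact Bool.false_ne_true this
  · exfalso
    rw [PySem.Str.endswith_eq, PySem.Chars.endswith_iff] at h1
    have : PySem.Chars.endswith b.toList "@@".toList = true := by
      rw [PySem.Chars.endswith_iff]
      simpa using key.mp (by simpa using h1)
    rw [PySem.Str.endswith_eq] at h2; rw [h2] at this; exact Bool.false_ne_true this
  · rfl

theorem loopR_eq_merge_bpe (rest : List String) : ∀ (x : String) (buf : String), okBuf buf →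
    loopR buf (x :: rest) = merge_bpe (catStr buf x :: rest) := by
  induction rest with
  | nil =>
    intro x buf _
    simp [loopR, merge_bpe]
  | cons y t ih =>
    intro x buf hb
    have hca := endswith_catStr buf x hb
    rw [loopR, merge_bpe, hca]
    rcases he : PySem.Str.endswith x "@@" with _|_
    · simp only [Bool.false_and, Bool.false_eq_true, if_false]
      rw [ih y "" okBuf_empty, catStr_empty_left]
    · simp only [Bool.true_and, List.isEmpty_cons, Bool.not_false, if_true]
      rw [ih y (rstripAt (catStr buf x)) (okBuf_rstripAt _), rstripAt_catStr _ _ hb]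

theorem fold_eq_loopR (n : Int) (ys : List String) : ∀ (i : Int) (acc : List String) (buf : String),
    i + ys.length = n →
    ((PySem.List.enumerate ys i).foldl
      (fun (st : List String × String) (p : Int × String) =>
        let cur := catStr st.2 p.2
        if PySem.Str.endswith p.2 "@@" && decide (p.1 < n - 1) then
          (st.1, rstripAt cur)
        else
          (st.1 ++ [cur], ""))
      (acc, buf)).1 = acc ++ loopR buf ys := by
  induction ys with
  | nil => intro i acc buf _; simp [PySem.List.enumerate_nil, loopR]
  | cons x t ih =>
    intro i acc buf hn
    rw [PySem.List.enumerate_cons, List.foldl_cons, loopR]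
    have hcond : decide (i < n - 1) = !t.isEmpty := by
      rcases t with _ | ⟨z, u⟩ <;> simp at hn ⊢ <;> omega
    dsimp only
    simp only [hcond]
    rcases hb : PySem.Str.endswith x "@@" && !t.isEmpty with _|_
    · simp only [Bool.false_eq_true, if_false]
      rw [ih (i + 1) (acc ++ [catStr buf x]) "" (by simp at hn ⊢; omega)]
      simp
    · simp only [if_true]
      exact ih (i + 1) acc (rstripAt (catStr buf x)) (by simp at hn ⊢; omega)

theorem alt_eq_loopR (xs : List String) : merge_bpe_alt xs = loopR "" xs := by
  unfold merge_bpe_alt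
  rw [fold_eq_loopR xs.length xs 0 [] "" (by simp)]
  simp

-- ===== VERDICT (by name: the statement is the Claim_ definition above) =====
theorem merge_bpe_spec : Claim_equal_merge_bpe := by
  intro xs _ hpre
  unfold Spec_merge_bpe
  match xs, hpre with
  | x :: rest, _ =>
    rw [alt_eq_loopR, loopR_eq_merge_bpe rest x "" okBuf_empty, catStr_empty_left]
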